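-- pv_equiv track=rewrite | github.com/zerohoon0102/Algorithm | programmers/p258705.py | solution
-- ===== SOURCE A (Python) =====
-- def solution(n, tops):
--     answer = 0
--     merge_dp = [0]*(2*n + 1)
--     alone_dp = [0]*(2*n + 1)
--
--     merge_dp[0] = 1
--     alone_dp[0] = 1
--
--     merge_dp[1] = 2 if tops[0] else 1
--     alone_dp[1] = 1
--     for i in range(2, 2*n+1):
--         if i%2 == 0:
--             merge_dp[i] = alone_dp[i-1]
--             alone_dp[i] = (merge_dp[i-1] + alone_dp[i-1])%10007
--         else:
--             merge_dp[i] = (2*alone_dp[i-1] + merge_dp[i-1])%10007 if tops[i//2] else alone_dp[i-1]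
--             alone_dp[i] = (merge_dp[i-1] + alone_dp[i-1])%10007
--
--     return (alone_dp[-1] + merge_dp[-1])%10007
-- ===== SOURCE B (Python) =====
-- def solution(n, tops):
--     # Two-scalar DP over the n towers: state (m, a) = (merge_dp, alone_dp) at odd index 2k+1.
--     towers = tops[:n]
--     m = 2 if towers[0] else 1
--     a = 1
--     for k in range(1, n):
--         if towers[k]:
--             m, a = (2 * m + 3 * a) % 10007, (m + 2 * a) % 10007
--         else:
--             m, a = (m + a) % 10007, (m + 2 * a) % 10007
--     return (m + 2 * a) % 10007
-- ===== Notes on version B (the rewrite author's own statement) =====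
-- stated objective: faster
-- what changed: Replaces the two (2n+1)-entry DP arrays with an even/odd index branch by a constant-space loop over the n towers that carries only the two current scalars, folding each even half-step and the final combination into a single per-tower transition.
import Mathlib
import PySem

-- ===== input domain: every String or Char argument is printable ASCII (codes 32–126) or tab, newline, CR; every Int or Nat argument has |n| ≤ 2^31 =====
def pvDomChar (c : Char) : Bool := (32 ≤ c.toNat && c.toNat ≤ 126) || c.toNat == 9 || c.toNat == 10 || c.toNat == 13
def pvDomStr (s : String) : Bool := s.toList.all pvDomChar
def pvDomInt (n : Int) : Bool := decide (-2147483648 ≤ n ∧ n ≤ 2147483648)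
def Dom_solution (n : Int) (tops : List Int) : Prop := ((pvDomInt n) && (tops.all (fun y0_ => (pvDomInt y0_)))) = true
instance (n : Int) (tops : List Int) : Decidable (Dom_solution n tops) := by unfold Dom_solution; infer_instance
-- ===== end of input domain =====

-- B replaces A's two (2n+1)-entry DP arrays (with an even/odd branch per half-step)
-- by a constant-space loop over the n towers carrying just the two current scalars;
-- equivalence of the RETURN value is proved on the stated precondition.

-- ===== PORT A =====
-- one iteration of A's `for i in range(2, 2*n+1)` loop; state = (merge_dp, alone_dp)
def stepA (tops : List Int) (st : List Int × List Int) (i : Int) : List Int × List Int :=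
  if PySem.Int.mod i 2 = 0 then
    (PySem.List.pySetD st.1 i (PySem.List.pyGetD st.2 (i-1) 0),
     PySem.List.pySetD st.2 i
       (PySem.Int.mod (PySem.List.pyGetD st.1 (i-1) 0 + PySem.List.pyGetD st.2 (i-1) 0) 10007))
  else
    (PySem.List.pySetD st.1 i
       (if PySem.List.pyGetD tops (PySem.Int.floordiv i 2) 0 ≠ 0 then
          PySem.Int.mod (2 * PySem.List.pyGetD st.2 (i-1) 0 + PySem.List.pyGetD st.1 (i-1) 0) 10007
        else PySem.List.pyGetD st.2 (i-1) 0),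
     PySem.List.pySetD st.2 i
       (PySem.Int.mod (PySem.List.pyGetD st.1 (i-1) 0 + PySem.List.pyGetD st.2 (i-1) 0) 10007))

def solution (n : Int) (tops : List Int) : Int :=
  let merge0 := PySem.List.pySetD (PySem.List.pySetD (List.replicate (2*n+1).toNat (0:Int)) 0 1) 1
    (if PySem.List.pyGetD tops 0 0 ≠ 0 then 2 else 1)
  let alone0 := PySem.List.pySetD (PySem.List.pySetD (List.replicate (2*n+1).toNat (0:Int)) 0 1) 1 1
  let st := (PySem.List.pyRange 2 (2*n+1) 1).foldl (stepA tops) (merge0, alone0)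
  PySem.Int.mod (PySem.List.pyGetD st.2 (-1) 0 + PySem.List.pyGetD st.1 (-1) 0) 10007

-- ===== PORT B =====
-- one iteration of B's `for k in range(1, n)` loop; state = (m, a)
def stepB (tops : List Int) (st : Int × Int) (k : Int) : Int × Int :=
  if PySem.List.pyGetD tops k 0 ≠ 0 then
    (PySem.Int.mod (2 * st.1 + 3 * st.2) 10007, PySem.Int.mod (st.1 + 2 * st.2) 10007)
  else
    (PySem.Int.mod (st.1 + st.2) 10007, PySem.Int.mod (st.1 + 2 * st.2) 10007)

def solution_alt (n : Int) (tops : List Int) : Int :=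
  let towers := PySem.List.slice tops none (some n)
  let m0 : Int := if PySem.List.pyGetD towers 0 0 ≠ 0 then 2 else 1
  let st := (PySem.List.pyRange 1 n 1).foldl (stepB towers) (m0, 1)
  PySem.Int.mod (st.1 + 2 * st.2) 10007

-- ===== PRECONDITION & SPEC =====
-- Pre_ excludes exactly the inputs on which the Python A raises IndexError:
-- n ≤ 0 (dp arrays too short for merge_dp[1]) or tops shorter than n (tops[i//2] out of range).
def Pre_solution (n : Int) (tops : List Int) : Prop := 1 ≤ n ∧ n ≤ (tops.length : Int)
instance (n : Int) (tops : List Int) : Decidable (Pre_solution n tops) := by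
  unfold Pre_solution; infer_instance
def pvWitness_solution : Int × List Int := (2, [1, 0])

def Spec_solution (n : Int) (tops : List Int) (out : Int) : Prop := out = solution_alt n tops
instance (n : Int) (tops : List Int) (out : Int) : Decidable (Spec_solution n tops out) := by
  unfold Spec_solution; infer_instance

-- ===== CLAIM (what is proved, stated in full; the proofs are below) =====
def Claim_equal_solution : Prop := ∀ (n : Int) (tops : List Int),
  Dom_solution n tops → Pre_solution n tops → Spec_solution n tops (solution n tops)
-- ===== LEMMAS AND PROOFS =====

-- one even A-step followed by one odd A-step advances the dp entries at the current odd
-- index exactly as one B-step advances the scalar pair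
lemma twostep (tA tB : List Int) (st : List Int × List Int) (k N : Nat)
    (h1 : st.1.length = N) (h2 : st.2.length = N) (hlt : 2*k+3 < N)
    (ht : PySem.List.pyGetD tB ((k:Int)+1) 0 = PySem.List.pyGetD tA ((k:Int)+1) 0) :
    (stepA tA (stepA tA st (2*(k:Int)+2)) (2*(k:Int)+3)).1.length = N ∧
    (stepA tA (stepA tA st (2*(k:Int)+2)) (2*(k:Int)+3)).2.length = N ∧
    (stepA tA (stepA tA st (2*(k:Int)+2)) (2*(k:Int)+3)).1.getD (2*k+3) 0
      = (stepB tB (st.1.getD (2*k+1) 0, st.2.getD (2*k+1) 0) ((k:Int)+1)).1 ∧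
    (stepA tA (stepA tA st (2*(k:Int)+2)) (2*(k:Int)+3)).2.getD (2*k+3) 0
      = (stepB tB (st.1.getD (2*k+1) 0, st.2.getD (2*k+1) 0) ((k:Int)+1)).2 := by
  have hm0 : PySem.Int.mod (2*(k:Int)+2) 2 = 0 := by
    rw [PySem.Int.mod_eq_emod_of_pos (by norm_num)]; omega
  have hm1 : ¬ PySem.Int.mod (2*(k:Int)+3) 2 = 0 := by
    rw [PySem.Int.mod_eq_emod_of_pos (by norm_num)]; omega
  have hfd : PySem.Int.floordiv (2*(k:Int)+3) 2 = (k:Int)+1 := by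
    rw [PySem.Int.floordiv_eq_ediv_of_pos (by norm_num)]; omega
  have e2 : (2*(k:Int)+2) = ((2*k+2 : Nat) : Int) := by push_cast; ring
  have e2' : ((2*k+2 : Nat) : Int) - 1 = ((2*k+1 : Nat) : Int) := by push_cast; ring
  have e3 : (2*(k:Int)+3) = ((2*k+3 : Nat) : Int) := by push_cast; ring
  have e3' : ((2*k+3 : Nat) : Int) - 1 = ((2*k+2 : Nat) : Int) := by push_cast; ring
  have sA2 : stepA tA st (2*(k:Int)+2)
      = (st.1.set (2*k+2) (st.2.getD (2*k+1) 0),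
         st.2.set (2*k+2) (PySem.Int.mod (st.1.getD (2*k+1) 0 + st.2.getD (2*k+1) 0) 10007)) := by
    rw [stepA, if_pos hm0, e2, e2']
    simp only [PySem.List.pySetD_natCast, PySem.List.pyGetD_natCast]
  have sA3 : stepA tA (stepA tA st (2*(k:Int)+2)) (2*(k:Int)+3)
      = (((stepA tA st (2*(k:Int)+2)).1).set (2*k+3)
           (if PySem.List.pyGetD tA ((k:Int)+1) 0 ≠ 0 then
              PySem.Int.mod (2 * ((stepA tA st (2*(k:Int)+2)).2).getD (2*k+2) 0
                 + ((stepA tA st (2*(k:Int)+2)).1).getD (2*k+2) 0) 10007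
            else ((stepA tA st (2*(k:Int)+2)).2).getD (2*k+2) 0),
         ((stepA tA st (2*(k:Int)+2)).2).set (2*k+3)
           (PySem.Int.mod (((stepA tA st (2*(k:Int)+2)).1).getD (2*k+2) 0
              + ((stepA tA st (2*(k:Int)+2)).2).getD (2*k+2) 0) 10007)) := by
    rw [stepA, if_neg hm1, hfd, e3, e3']
    simp only [PySem.List.pySetD_natCast, PySem.List.pyGetD_natCast]
  have hb1 : 2*k+2 < st.1.length := by omega
  have hb2 : 2*k+2 < st.2.length := by omega
  have g1 : (st.1.set (2*k+2) (st.2.getD (2*k+1) 0)).getD (2*k+2) 0 = st.2.getD (2*k+1) 0 := by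
    simp [List.getD, hb1]
  have g2 : (st.2.set (2*k+2)
      (PySem.Int.mod (st.1.getD (2*k+1) 0 + st.2.getD (2*k+1) 0) 10007)).getD (2*k+2) 0
      = PySem.Int.mod (st.1.getD (2*k+1) 0 + st.2.getD (2*k+1) 0) 10007 := by
    simp [List.getD, hb2]
  rw [sA3, sA2]
  simp only [g1, g2, List.length_set, h1, h2]
  refine ⟨trivial, trivial, ?_, ?_⟩
  · rw [stepB, ht]
    by_cases hc : PySem.List.pyGetD tA ((k:Int)+1) 0 ≠ 0
    · rw [if_pos hc, if_pos hc]
      simp [List.getD, show 2*k+3 < st.1.length by omega]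
      omega
    · rw [if_neg hc, if_neg hc]
      simp [List.getD, show 2*k+3 < st.1.length by omega]
  · rw [stepB, ht]
    by_cases hc : PySem.List.pyGetD tA ((k:Int)+1) 0 ≠ 0
    · rw [if_pos hc]
      simp [List.getD, show 2*k+3 < st.2.length by omega]
      omega
    · rw [if_neg hc]
      simp [List.getD, show 2*k+3 < st.2.length by omega]
      omega
-- the loop invariant: after A has processed i = 2,…,2k+1, its dp lists keep their full
-- length and their entries at index 2k+1 are B's scalar state after k iterations
lemma invA (tops towers : List Int) (n : Int) (hn : 1 ≤ n)
    (hEq : ∀ j : Nat, j < n.toNat →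
      PySem.List.pyGetD towers (j:Int) 0 = PySem.List.pyGetD tops (j:Int) 0)
    (k : Nat) (hk : (k : Int) ≤ n - 1) :
    ((PySem.List.pyRange 2 (2*(k:Int)+2) 1).foldl (stepA tops)
      (PySem.List.pySetD (PySem.List.pySetD (List.replicate (2*n+1).toNat (0:Int)) 0 1) 1
        (if PySem.List.pyGetD tops 0 0 ≠ 0 then 2 else 1),
       PySem.List.pySetD (PySem.List.pySetD (List.replicate (2*n+1).toNat (0:Int)) 0 1) 1 1)).1.length
        = (2*n+1).toNat ∧
    ((PySem.List.pyRange 2 (2*(k:Int)+2) 1).foldl (stepA tops)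
      (PySem.List.pySetD (PySem.List.pySetD (List.replicate (2*n+1).toNat (0:Int)) 0 1) 1
        (if PySem.List.pyGetD tops 0 0 ≠ 0 then 2 else 1),
       PySem.List.pySetD (PySem.List.pySetD (List.replicate (2*n+1).toNat (0:Int)) 0 1) 1 1)).2.length
        = (2*n+1).toNat ∧
    ((PySem.List.pyRange 2 (2*(k:Int)+2) 1).foldl (stepA tops)
      (PySem.List.pySetD (PySem.List.pySetD (List.replicate (2*n+1).toNat (0:Int)) 0 1) 1
        (if PySem.List.pyGetD tops 0 0 ≠ 0 then 2 else 1),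
       PySem.List.pySetD (PySem.List.pySetD (List.replicate (2*n+1).toNat (0:Int)) 0 1) 1 1)).1.getD (2*k+1) 0
        = ((PySem.List.pyRange 1 (1+(k:Int)) 1).foldl (stepB towers)
            ((if PySem.List.pyGetD towers 0 0 ≠ 0 then 2 else 1), 1)).1 ∧
    ((PySem.List.pyRange 2 (2*(k:Int)+2) 1).foldl (stepA tops)
      (PySem.List.pySetD (PySem.List.pySetD (List.replicate (2*n+1).toNat (0:Int)) 0 1) 1
        (if PySem.List.pyGetD tops 0 0 ≠ 0 then 2 else 1),
       PySem.List.pySetD (PySem.List.pySetD (List.replicate (2*n+1).toNat (0:Int)) 0 1) 1 1)).2.getD (2*k+1) 0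
        = ((PySem.List.pyRange 1 (1+(k:Int)) 1).foldl (stepB towers)
            ((if PySem.List.pyGetD towers 0 0 ≠ 0 then 2 else 1), 1)).2 := by
  induction k with
  | zero =>
    have hr1 : PySem.List.pyRange 2 (2*((0:Nat):Int)+2) 1 = [] := by
      rw [PySem.List.pyRange_one_eq_nil]; norm_num
    have hr2 : PySem.List.pyRange 1 (1+((0:Nat):Int)) 1 = [] := by
      rw [PySem.List.pyRange_one_eq_nil]; norm_num
    rw [hr1, hr2]
    have h0 : PySem.List.pyGetD towers (0:Int) 0 = PySem.List.pyGetD tops (0:Int) 0 := by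
      simpa using hEq 0 (by omega)
    rw [h0]
    simp [pysem, List.getD, show (0:Int) < n by omega]
  | succ k ih =>
    have hk' : (k : Int) ≤ n - 1 := by push_cast at hk ⊢; omega
    obtain ⟨ih1, ih2, ih3, ih4⟩ := ih hk'
    have hrA : PySem.List.pyRange 2 (2*((k+1:Nat):Int)+2) 1
        = (PySem.List.pyRange 2 (2*(k:Int)+2) 1) ++ [2*(k:Int)+2] ++ [2*(k:Int)+3] := by
      have e : (2*((k+1:Nat):Int)+2) = (2*(k:Int)+3)+1 := by push_cast; ring
      have e' : (2*(k:Int)+3) = (2*(k:Int)+2)+1 := by ring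
      rw [e, PySem.List.pyRange_one_succ_right (by omega), e',
          PySem.List.pyRange_one_succ_right (by omega)]
    have hrB : PySem.List.pyRange 1 (1+((k+1:Nat):Int)) 1
        = (PySem.List.pyRange 1 (1+(k:Int)) 1) ++ [1+(k:Int)] := by
      have e : (1+((k+1:Nat):Int)) = (1+(k:Int))+1 := by push_cast; ring
      rw [e, PySem.List.pyRange_one_succ_right (by omega)]
    rw [hrA, hrB]
    simp only [List.foldl_append, List.foldl_cons, List.foldl_nil]
    have hlt : 2*k+3 < (2*n+1).toNat := by omega
    have ht : PySem.List.pyGetD towers ((k:Int)+1) 0 = PySem.List.pyGetD tops ((k:Int)+1) 0 := by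
      simpa using hEq (k+1) (by omega)
    obtain ⟨t1, t2, t3, t4⟩ := twostep tops towers _ k (2*n+1).toNat ih1 ih2 hlt ht
    have eidx : 2*(k+1)+1 = 2*k+3 := by omega
    have eB : (1+(k:Int)) = (k:Int)+1 := by ring
    rw [eidx, eB]
    refine ⟨t1, t2, ?_, ?_⟩
    · rw [t3, ih3, ih4, eB]
    · rw [t4, ih3, ih4, eB]

-- the final even half-step of A folded into B's closing (m + 2a) % 10007
lemma solution_eq (n : Int) (tops : List Int) (hn : 1 ≤ n) :
    solution n tops = solution_alt n tops := by
  have hM : (0:Int) < 10007 := by norm_num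
  have hsl : PySem.List.slice tops none (some n) = tops.take n.toNat := by
    have h := PySem.List.slice_to_natCast (xs := tops) (b := n.toNat)
    rw [show ((n.toNat : Nat) : Int) = n by omega] at h
    exact h
  have hEq : ∀ j : Nat, j < n.toNat →
      PySem.List.pyGetD (tops.take n.toNat) (j:Int) 0 = PySem.List.pyGetD tops (j:Int) 0 := by
    intro j hj
    simp [List.getD, hj]
  obtain ⟨i1, i2, i3, i4⟩ := invA tops (tops.take n.toNat) n hn hEq (n-1).toNat (by omega)
  have hrA : PySem.List.pyRange 2 (2*n+1) 1
      = PySem.List.pyRange 2 (2*(((n-1).toNat):Int)+2) 1 ++ [2*(((n-1).toNat):Int)+2] := by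
    have e : 2*n+1 = (2*(((n-1).toNat):Int)+2)+1 := by omega
    rw [e, PySem.List.pyRange_one_succ_right (by omega)]
  have hrB : PySem.List.pyRange 1 n 1 = PySem.List.pyRange 1 (1+(((n-1).toNat):Int)) 1 := by
    rw [show 1+(((n-1).toNat):Int) = n by omega]
  simp only [solution, solution_alt]
  rw [hsl, hrA, hrB, List.foldl_append, List.foldl_cons, List.foldl_nil]
  have hm0 : PySem.Int.mod (2*(((n-1).toNat):Int)+2) 2 = 0 := by
    rw [PySem.Int.mod_eq_emod_of_pos (by norm_num)]; omega
  rw [stepA, if_pos hm0]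
  have e2 : (2*(((n-1).toNat):Int)+2) = ((2*(n-1).toNat+2 : Nat) : Int) := by push_cast; ring
  have e2' : ((2*(n-1).toNat+2 : Nat) : Int) - 1 = ((2*(n-1).toNat+1 : Nat) : Int) := by push_cast; ring
  rw [e2] at i1 i2 i3 i4
  rw [e2, e2']
  simp only [PySem.List.pySetD_natCast, PySem.List.pyGetD_natCast]
  rw [i3, i4]
  rw [PySem.List.pyGetD_neg_ofNat _ 1 0 (by norm_num) (by rw [List.length_set, i2]; omega),
      PySem.List.pyGetD_neg_ofNat _ 1 0 (by norm_num) (by rw [List.length_set, i1]; omega)]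
  simp only [List.length_set, i1, i2]
  rw [List.getElem_set, List.getElem_set]
  have hidx : 2*(n-1).toNat+2 = (2*n+1).toNat - 1 := by omega
  rw [if_pos hidx, if_pos hidx]
  simp only [PySem.Int.mod_eq_emod_of_pos hM]
  omega

-- ===== VERDICT (by name: the statement is the Claim_ definition above) =====
theorem solution_spec : Claim_equal_solution := by
  intro n tops _ hpre
  show solution n tops = solution_alt n tops
  exact solution_eq n tops hpre.1
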